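-- pv_equiv track=rewrite | github.com/baokui/text_search | passiveRecommend/modules.py | getPunExist
-- ===== SOURCE A (Python) =====
-- def getPunExist(Str,punc=[]):
--     if len(punc)==0:
--         punc = '.,?!。，？！'
--     r = 0
--     for s in Str:
--         if s in punc:
--             r = 1
--             break
--     return [r]
-- ===== SOURCE B (Python) =====
-- def getPunExist(Str, punc=[]):
--     if len(punc) == 0:
--         punc = '.,?!。，？！'
--     return [int(bool(set(Str) & set(punc)))]
-- ===== Notes on version B (the rewrite author's own statement) =====
-- stated objective: idiomatic
-- what changed: Replaces the early-exit character scan with building the two character sets once and testing their intersection for non-emptiness.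
import Mathlib
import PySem

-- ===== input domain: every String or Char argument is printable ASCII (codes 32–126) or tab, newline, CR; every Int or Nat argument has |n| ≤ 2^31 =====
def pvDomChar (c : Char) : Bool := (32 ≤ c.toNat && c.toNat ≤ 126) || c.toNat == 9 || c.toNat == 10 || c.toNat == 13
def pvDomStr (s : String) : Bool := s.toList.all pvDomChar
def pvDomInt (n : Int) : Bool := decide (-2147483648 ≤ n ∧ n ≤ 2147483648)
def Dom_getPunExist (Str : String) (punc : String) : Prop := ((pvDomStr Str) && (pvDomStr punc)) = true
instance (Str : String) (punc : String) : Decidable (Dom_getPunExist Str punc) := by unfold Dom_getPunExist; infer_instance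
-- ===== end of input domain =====

-- B replaces A's early-exit character scan by a set intersection (idiomatic; return value identical).


-- ===== PORT A =====
-- the 'for s in Str: if s in punc: r = 1; break' loop, as structural recursion (break = stop recursing)
def pvLoopA (punc : List Char) : List Char → Int
  | [] => 0
  | c :: rest => if c ∈ punc then 1 else pvLoopA punc rest

def getPunExist (Str : String) (punc : String) : List Int :=
  let punc := if PySem.Str.len punc == 0 then ".,?!。，？！" else punc
  [pvLoopA punc.toList Str.toList]

-- ===== PORT B =====
def getPunExist_alt (Str : String) (punc : String) : List Int :=
  let punc := if PySem.Str.len punc == 0 then ".,?!。，？！" else punc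
  let inter := PySem.Set.inter (PySem.Set.ofList Str.toList) (PySem.Set.ofList punc.toList)
  [if inter.isEmpty then 0 else 1]

-- ===== PRECONDITION & SPEC =====
def Spec_getPunExist (Str : String) (punc : String) (out : List Int) : Prop := out = getPunExist_alt Str punc
instance (Str : String) (punc : String) (out : List Int) : Decidable (Spec_getPunExist Str punc out) := by unfold Spec_getPunExist; infer_instance

-- ===== CLAIM (what is proved, stated in full; the proofs are below) =====
def Claim_equal_getPunExist : Prop := ∀ (Str : String) (punc : String), Dom_getPunExist Str punc → Spec_getPunExist Str punc (getPunExist Str punc)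

-- ===== LEMMAS AND PROOFS =====
theorem pvLoopA_eq (punc : List Char) (l : List Char) :
    pvLoopA punc l = if ∃ c ∈ l, c ∈ punc then 1 else 0 := by
  induction l with
  | nil => simp [pvLoopA]
  | cons c rest ih =>
    simp only [pvLoopA, ih]
    by_cases h : c ∈ punc <;> simp [h]

theorem pvInter_empty_iff (s p : List Char) :
    (PySem.Set.inter (PySem.Set.ofList s) (PySem.Set.ofList p)).isEmpty = true ↔
      ¬ ∃ c ∈ s, c ∈ p := by
  rw [List.isEmpty_iff, List.eq_nil_iff_forall_not_mem]
  constructor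
  · intro h ⟨c, hc, hcp⟩
    exact h c (by rw [PySem.Set.mem_inter]; simp [PySem.Set.mem_ofList, hc, hcp])
  · intro h c hc
    rw [PySem.Set.mem_inter, PySem.Set.mem_ofList, PySem.Set.mem_ofList] at hc
    exact h ⟨c, hc.1, hc.2⟩

-- ===== VERDICT (by name: the statement is the Claim_ definition above) =====
theorem pvKey (s p : List Char) :
    pvLoopA p s =
      if (PySem.Set.inter (PySem.Set.ofList s) (PySem.Set.ofList p)).isEmpty then 0 else 1 := by
  rw [pvLoopA_eq]
  by_cases h : ∃ c ∈ s, c ∈ p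
  · rw [if_pos h, if_neg (by rw [pvInter_empty_iff]; exact not_not_intro h)]
  · rw [if_neg h, if_pos (by rw [pvInter_empty_iff]; exact h)]

theorem getPunExist_spec : Claim_equal_getPunExist := by
  intro Str punc _
  unfold Spec_getPunExist getPunExist getPunExist_alt
  simp only [pvKey]
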